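-- pv_equiv track=rewrite | github.com/DigiDuncan/Charm-Legacy | charm/lib/utils.py | maxTuple
-- ===== SOURCE A (Python) =====
-- from typing import Tuple
--
-- def maxTuple(d: dict, absolute = False) -> Tuple:
--     rev = {v: k for k, v in d.items()}
--     absmap = {abs(v): v for v in d.values()}
--     if absolute:
--         values = []
--         for v in d.values():
--             values.append(abs(v))
--         maxv = max(values)
--         return (rev[absmap[maxv]], absmap[maxv])
--     else:
--         values = []
--         for v in d.values():
--             values.append(v)
--         maxv = max(values)
--         return (rev[maxv], maxv)
-- ===== SOURCE B (Python) =====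
-- def maxTuple(d: dict, absolute = False):
--     key = abs if absolute else (lambda v: v)
--     best = None
--     for k, v in d.items():
--         if best is None or key(v) >= key(best[1]):
--             best = (k, v)
--     if best is None:
--         raise ValueError("maxTuple() arg is an empty dict")
--     return best
-- ===== Notes on version B (the rewrite author's own statement) =====
-- stated objective: simpler
-- what changed: Replaced the two reverse-index dicts (value->key, abs->value) and the values list plus max() with one direct scan over d.items() that keeps the best (key, value) pair, using >= so the last maximal entry wins exactly as the dict overwrites did.
import Mathlib
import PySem

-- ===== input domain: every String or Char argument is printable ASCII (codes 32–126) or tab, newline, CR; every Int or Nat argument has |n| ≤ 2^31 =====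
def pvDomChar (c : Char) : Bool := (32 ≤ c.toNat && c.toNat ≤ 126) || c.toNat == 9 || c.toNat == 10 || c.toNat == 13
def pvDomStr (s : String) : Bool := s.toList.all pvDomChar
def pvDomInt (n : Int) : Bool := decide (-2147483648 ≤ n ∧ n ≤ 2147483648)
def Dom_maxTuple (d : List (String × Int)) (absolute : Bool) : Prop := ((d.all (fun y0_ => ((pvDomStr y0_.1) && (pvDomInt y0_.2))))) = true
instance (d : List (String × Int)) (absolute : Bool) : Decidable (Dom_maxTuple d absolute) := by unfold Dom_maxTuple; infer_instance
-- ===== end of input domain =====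

-- B replaces A's two reverse-index dicts and values list with one scan keeping the best pair (objective: simpler).

-- ===== PORT A =====
-- rev = {v: k for k, v in d.items()}
def pvRevA (d : List (String × Int)) : PySem.Dict Int String :=
  d.foldl (fun acc kv => acc.insert kv.2 kv.1) PySem.Dict.empty

-- absmap = {abs(v): v for v in d.values()}
def pvAbsmapA (d : List (String × Int)) : PySem.Dict Int Int :=
  d.foldl (fun acc kv => acc.insert |kv.2| kv.2) PySem.Dict.empty

-- the 'values' list built by the loop, absolute branch (abs applied) / plain branch
def pvValuesAbsA (d : List (String × Int)) : List Int :=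
  d.foldl (fun acc kv => acc ++ [|kv.2|]) []
def pvValuesA (d : List (String × Int)) : List Int :=
  d.foldl (fun acc kv => acc ++ [kv.2]) []

def maxTuple (d : List (String × Int)) (absolute : Bool) : String × Int :=
  let rev := pvRevA d
  let absmap := pvAbsmapA d
  if absolute then
    let values := pvValuesAbsA d
    match PySem.List.max? values (fun x => x) with
    | none => ("", 0)          -- max([]) raises ValueError: outside Pre_
    | some maxv =>
      match absmap.get? maxv with
      | none => ("", 0)        -- KeyError: unreachable
      | some v =>
        match rev.get? v with
        | none => ("", 0)      -- KeyError: unreachable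
        | some k => (k, v)
  else
    let values := pvValuesA d
    match PySem.List.max? values (fun x => x) with
    | none => ("", 0)          -- max([]) raises ValueError: outside Pre_
    | some maxv =>
      match rev.get? maxv with
      | none => ("", 0)        -- KeyError: unreachable
      | some k => (k, maxv)

-- ===== PORT B =====
-- key = abs if absolute else identity
def pvKey (absolute : Bool) (v : Int) : Int := if absolute then |v| else v

-- loop body: keep (k, v) when key(v) >= key(best[1]) (last maximal pair wins)
def pvBestStep (absolute : Bool) (best : Option (String × Int)) (kv : String × Int) :
    Option (String × Int) :=
  match best with
  | none => some kv
  | some b => if pvKey absolute kv.2 ≥ pvKey absolute b.2 then some kv else some b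

def maxTuple_alt (d : List (String × Int)) (absolute : Bool) : String × Int :=
  match d.foldl (pvBestStep absolute) none with
  | some b => b
  | none => ("", 0)            -- raise ValueError: outside Pre_

-- ===== PRECONDITION & SPEC =====
-- Pre_ excludes only the empty dict, on which A raises ValueError (max of an empty list) and B raises ValueError too.
def Pre_maxTuple (d : List (String × Int)) (absolute : Bool) : Prop := d ≠ []
instance (d : List (String × Int)) (absolute : Bool) : Decidable (Pre_maxTuple d absolute) := by
  unfold Pre_maxTuple; infer_instance

def pvWitness_maxTuple : (List (String × Int)) × Bool := ([("a", 1), ("b", -3)], true)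

def Spec_maxTuple (d : List (String × Int)) (absolute : Bool) (out : String × Int) : Prop := out = maxTuple_alt d absolute
instance (d : List (String × Int)) (absolute : Bool) (out : String × Int) : Decidable (Spec_maxTuple d absolute out) := by unfold Spec_maxTuple; infer_instance

-- ===== CLAIM (what is proved, stated in full; the proofs are below) =====
def Claim_equal_maxTuple : Prop := ∀ (d : List (String × Int)) (absolute : Bool), Dom_maxTuple d absolute → Pre_maxTuple d absolute → Spec_maxTuple d absolute (maxTuple d absolute)

-- ===== LEMMAS AND PROOFS =====

-- max(xs ++ [y]) = max(max(xs), y) for nonempty xs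
theorem pv_max?_id_snoc (xs : List Int) (y m : Int)
    (h : PySem.List.max? xs (fun x => x) = some m) :
    PySem.List.max? (xs ++ [y]) (fun x => x) = some (max m y) := by
  cases xs with
  | nil =>
    have h0 : PySem.List.max? ([] : List Int) (fun x => x) = none :=
      (PySem.List.max?_eq_none_iff _ _).mpr rfl
    rw [h0] at h; cases h
  | cons x t =>
    rw [PySem.List.max?_id_cons] at h
    rw [List.cons_append, PySem.List.max?_id_cons, List.foldl_append]
    simp only [List.foldl_cons, List.foldl_nil]
    injection h with h
    rw [h]

-- the invariant tying A's dicts/values to B's running best, for nonempty input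
theorem pv_inv (absolute : Bool) :
    ∀ (d : List (String × Int)), d ≠ [] →
      ∃ k v,
        d.foldl (pvBestStep absolute) none = some (k, v) ∧
        PySem.List.max? (if absolute then pvValuesAbsA d else pvValuesA d) (fun x => x)
          = some (pvKey absolute v) ∧
        (absolute = true → (pvAbsmapA d).get? (pvKey absolute v) = some v) ∧
        (pvRevA d).get? v = some k := by
  intro d
  induction d using List.reverseRecOn with
  | nil => intro h; exact absurd rfl h
  | append_singleton d p ih =>
    intro _
    rcases p with ⟨k0, v0⟩
    by_cases hd : d = []
    · subst hd
      refine ⟨k0, v0, ?_, ?_, ?_, ?_⟩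
      · simp [pvBestStep]
      · cases absolute <;>
          simp [pvValuesAbsA, pvValuesA, pvKey, PySem.List.max?_id_cons]
      · intro ha; subst ha
        simp [pvAbsmapA, pvKey, PySem.Dict.get?_insert_self]
      · simp [pvRevA, PySem.Dict.get?_insert_self]
    · obtain ⟨k, v, hb, hm, habs, hrev⟩ := ih hd
      have hvals : (if absolute then pvValuesAbsA (d ++ [(k0, v0)]) else pvValuesA (d ++ [(k0, v0)]))
          = (if absolute then pvValuesAbsA d else pvValuesA d) ++ [pvKey absolute v0] := by
        cases absolute <;> simp [pvValuesAbsA, pvValuesA, pvKey, List.foldl_append]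
      have hrev' : pvRevA (d ++ [(k0, v0)]) = (pvRevA d).insert v0 k0 := by
        simp [pvRevA, List.foldl_append]
      have habs' : pvAbsmapA (d ++ [(k0, v0)]) = (pvAbsmapA d).insert |v0| v0 := by
        simp [pvAbsmapA, List.foldl_append]
      have hb' : (d ++ [(k0, v0)]).foldl (pvBestStep absolute) none
          = pvBestStep absolute (some (k, v)) (k0, v0) := by
        simp [List.foldl_append, hb]
      by_cases hge : pvKey absolute v0 ≥ pvKey absolute v
      · refine ⟨k0, v0, ?_, ?_, ?_, ?_⟩
        · rw [hb']; simp [pvBestStep, hge]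
        · rw [hvals, pv_max?_id_snoc _ _ _ hm]
          congr 1
          omega
        · intro ha; subst ha
          rw [habs']
          simp only [pvKey, if_true]
          exact PySem.Dict.get?_insert_self _ _ _
        · rw [hrev']
          exact PySem.Dict.get?_insert_self _ _ _
      · have hlt : pvKey absolute v0 < pvKey absolute v := lt_of_not_ge hge
        have hne : v0 ≠ v := by
          intro he; subst he; omega
        refine ⟨k, v, ?_, ?_, ?_, ?_⟩
        · rw [hb']; simp [pvBestStep, hge]
        · rw [hvals, pv_max?_id_snoc _ _ _ hm]
          congr 1
          omega
        · intro ha; subst ha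
          rw [habs']
          have hlt' : |v0| < |v| := by simpa [pvKey] using hlt
          have hkne : pvKey true v ≠ |v0| := by simp [pvKey]; omega
          rw [PySem.Dict.get?_insert_of_ne _ _ hkne]
          exact habs rfl
        · rw [hrev', PySem.Dict.get?_insert_of_ne _ _ hne.symm]
          exact hrev

-- ===== VERDICT (by name: the statement is the Claim_ definition above) =====
theorem maxTuple_spec : Claim_equal_maxTuple := by
  intro d absolute _ hpre
  obtain ⟨k, v, hb, hm, habs, hrev⟩ := pv_inv absolute d hpre
  unfold Spec_maxTuple maxTuple maxTuple_alt
  rw [hb]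
  cases absolute with
  | false =>
    simp [pvKey] at hm
    simp [hm, hrev]
  | true =>
    simp [pvKey] at hm
    have habs' : (pvAbsmapA d).get? |v| = some v := by simpa [pvKey] using habs rfl
    simp [hm, habs', hrev]
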